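/- GENERATED by farm/mkstatement.py from design/units.tsv (unit `get8_packet_raw`) and the Specs of Vorbis/Spec/*.lean — do not edit.
   THE STATEMENT of the proof unit `get8_packet_raw`: the function `get8_packet_raw` (31 instructions) satisfies its contract,
   given the contracts of its callees. What the names mean: Vorbis/Spec/Basic.lean. The theorem to prove:
   `theorem get8_packet_raw_ok : Vorbis.Spec.get8_packet_raw.Statement`. -/
import Vorbis.Spec.Reader
namespace Vorbis.Spec.get8_packet_raw
open X86 X86.User Asan

/-- The statement of unit `get8_packet_raw`. -/
def Statement : Prop :=
  ∀ (Lay : Layout) (_hLay : Lay.hi = 0x1000000) (μ : Microarch) (_hμ : UserX.MicroOK μ) (u₀ : State)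
    (_hcode : HasCodeNat Lay u₀ Vorbis.L.get8_packet_raw.entry Vorbis.Code.code_get8_packet_raw.nat Vorbis.L.get8_packet_raw.size)
    (_h_asan_load1_noabort : Asan.SmallCheck Lay μ Vorbis.WayInv (Vorbis.CodeOK u₀) [.rax, .rdx] 1 Vorbis.L.__asan_load1_noabort.entry)
    (_h_asan_load4_noabort : Asan.SmallCheck Lay μ Vorbis.WayInv (Vorbis.CodeOK u₀) [.rax, .rcx, .rdx] 4 Vorbis.L.__asan_load4_noabort.entry)
    (_h_next_segment : ∀ (others : List Obj) (frames : List (Nat × FrameLayout)) (Blk : Block → Prop) (len : Nat), Calls Lay μ Vorbis.WayInv (Vorbis.conv u₀) Vorbis.L.next_segment.entry (Vorbis.Spec.next_segment.spec others frames Blk len))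
    (_h_get8 : ∀ (others : List Obj) (frames : List (Nat × FrameLayout)) (Blk : Block → Prop) (len : Nat), Calls Lay μ Vorbis.WayInv (Vorbis.conv u₀) Vorbis.L.get8.entry (Vorbis.Spec.get8.spec others frames Blk len)),
    ∀ (others : List Obj) (frames : List (Nat × FrameLayout)) (Blk : Block → Prop) (len : Nat), Calls Lay μ Vorbis.WayInv (Vorbis.conv u₀) Vorbis.L.get8_packet_raw.entry (Vorbis.Spec.get8_packet_raw.spec others frames Blk len)

end Vorbis.Spec.get8_packet_raw
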